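-- pv_equiv track=rewrite | github.com/alexandraback/datacollection | solutions_2751486_0/Python/desseim/consonants.py | find_cons_ranges
-- ===== SOURCE A (Python) =====
-- VOWELS = { 'a', 'i', 'u', 'e', 'o' }
--
-- def is_consonant(char):
--     return char not in VOWELS
--
-- def find_cons_ranges(string, range_min_len):
--     ranges = []
--     ind_start = -1
--     ind_end = -1
--     ind = 0
--     #import pdb; pdb.set_trace()
--     while ind < len(string):
--         if is_consonant(string[ind]):
--             ind_start = ind
--             ind += 1
--             while ind < len(string) and is_consonant(string[ind]):
--                 ind += 1
--             #went out, current string[ind] is \0 or a vowel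
--             ind_end = ind
--
--             #we have a range
--             if ind_end - ind_start >= range_min_len:
--                 for i in range(ind_start, ind_end - range_min_len + 1):
--                     ranges.append((i, i+range_min_len-1))
--         else: ind += 1
--     return ranges
-- ===== SOURCE B (Python) =====
-- VOWELS = { 'a', 'i', 'u', 'e', 'o' }
--
-- def find_cons_ranges(string, range_min_len):
--     # boundaries = virtual vowel before the string, every vowel position, virtual vowel after it;
--     # each pair of adjacent boundaries more than one apart encloses a maximal consonant gap.
--     bounds = [-1] + [i for i, ch in enumerate(string) if ch in VOWELS] + [len(string)]
--     return [(i, i + range_min_len - 1)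
--             for lo, hi in zip(bounds, bounds[1:])
--             if hi - lo > 1
--             for i in range(lo + 1, hi - range_min_len + 1)]
-- ===== Notes on version B (the rewrite author's own statement) =====
-- stated objective: alternative
-- what changed: A's stateful two-level while-loop scanner over runs is replaced by an inversion: collect the vowel positions once (with virtual vowels at -1 and len), pair adjacent boundaries with zip(bounds, bounds[1:]), and emit the windows of each gap wider than one; no run-tracking state machine or per-character indexing remains.
import Mathlib
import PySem

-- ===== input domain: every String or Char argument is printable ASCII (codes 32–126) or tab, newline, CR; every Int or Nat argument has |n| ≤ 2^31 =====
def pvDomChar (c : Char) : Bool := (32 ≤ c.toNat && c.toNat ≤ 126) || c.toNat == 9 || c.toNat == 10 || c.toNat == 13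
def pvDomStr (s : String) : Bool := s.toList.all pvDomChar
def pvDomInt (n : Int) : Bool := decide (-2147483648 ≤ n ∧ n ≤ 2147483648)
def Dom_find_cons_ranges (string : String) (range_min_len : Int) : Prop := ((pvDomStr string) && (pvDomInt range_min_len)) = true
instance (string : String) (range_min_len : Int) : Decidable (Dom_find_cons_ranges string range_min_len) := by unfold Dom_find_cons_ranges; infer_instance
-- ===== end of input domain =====

-- B inverts A's two-level run scanner: it lists the vowel positions (with virtual vowels at -1 and len),
-- pairs adjacent boundaries, and emits the windows of each gap wider than one (same return value; alternative, not faster).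

-- ===== PORT A =====
def VOWELS : PySem.Set Char := PySem.Set.ofList ['a', 'i', 'u', 'e', 'o']

def is_consonant (c : Char) : Bool := !(VOWELS.contains c)

-- inner 'while ind < len(string) and is_consonant(string[ind]): ind += 1' on the remaining chars; returns (rest, ind)
def innerA : List Char → Int → (List Char × Int)
  | [], ind => ([], ind)
  | c :: rest, ind => if is_consonant c then innerA rest (ind + 1) else (c :: rest, ind)

theorem innerA_length_le : ∀ (cs : List Char) (ind : Int), (innerA cs ind).1.length ≤ cs.length := by
  intro cs
  induction cs with
  | nil => intro ind; simp [innerA]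
  | cons c rest ih =>
    intro ind
    simp only [innerA]
    split
    · exact le_trans (ih (ind + 1)) (Nat.le_succ _)
    · exact le_refl _

-- outer while loop of A (ranges built left to right)
def loopA (rml : Int) : List Char → Int → List (Int × Int)
  | [], _ => []
  | c :: rest, ind =>
    if is_consonant c then
      let p := innerA rest (ind + 1)
      (if p.2 - ind ≥ rml then (PySem.List.pyRange ind (p.2 - rml + 1) 1).map (fun i => (i, i + rml - 1)) else [])
        ++ loopA rml p.1 p.2
    else loopA rml rest (ind + 1)
  termination_by cs => cs.length
  decreasing_by
  · exact Nat.lt_succ_of_le (innerA_length_le rest (ind + 1))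
  · simp

def find_cons_ranges (string : String) (range_min_len : Int) : List (Int × Int) :=
  loopA range_min_len string.toList 0

-- ===== PORT B =====
-- '[i for i, ch in enumerate(string) if ch in VOWELS]' (enumerate fused into the recursion, index i)
def vowelPos : List Char → Int → List Int
  | [], _ => []
  | c :: rest, i => if VOWELS.contains c then i :: vowelPos rest (i + 1) else vowelPos rest (i + 1)

def find_cons_ranges_alt (string : String) (range_min_len : Int) : List (Int × Int) :=
  let cs := string.toList
  let bounds : List Int := -1 :: (vowelPos cs 0 ++ [(cs.length : Int)])
  (bounds.zip bounds.tail).flatMap (fun p =>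
    if p.2 - p.1 > 1 then
      (PySem.List.pyRange (p.1 + 1) (p.2 - range_min_len + 1) 1).map (fun i => (i, i + range_min_len - 1))
    else [])

-- ===== PRECONDITION & SPEC =====
def Spec_find_cons_ranges (string : String) (range_min_len : Int) (out : List (Int × Int)) : Prop := out = find_cons_ranges_alt string range_min_len
instance (string : String) (range_min_len : Int) (out : List (Int × Int)) : Decidable (Spec_find_cons_ranges string range_min_len out) := by unfold Spec_find_cons_ranges; infer_instance

-- ===== CLAIM =====
def Claim_equal_find_cons_ranges : Prop := ∀ (string : String) (range_min_len : Int), Dom_find_cons_ranges string range_min_len → Spec_find_cons_ranges string range_min_len (find_cons_ranges string range_min_len)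

-- ===== LEMMAS AND PROOFS =====

-- windows of one boundary gap
def win (rml : Int) (p : Int × Int) : List (Int × Int) :=
  if p.2 - p.1 > 1 then
    (PySem.List.pyRange (p.1 + 1) (p.2 - rml + 1) 1).map (fun i => (i, i + rml - 1))
  else []

-- windows of all adjacent pairs of a boundary list
def gwin (rml : Int) : List Int → List (Int × Int)
  | a :: b :: rest => win rml (a, b) ++ gwin rml (b :: rest)
  | _ => []

theorem zip_tail_flatMap (rml : Int) : ∀ (l : List Int),
    (l.zip l.tail).flatMap (win rml) = gwin rml l := by
  intro l
  induction l with
  | nil => simp [gwin]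
  | cons a t ih =>
    cases t with
    | nil => simp [gwin]
    | cons b rest =>
      simp only [List.tail_cons, List.zip_cons_cons, List.flatMap_cons, gwin]
      rw [← ih]
      simp

theorem innerA_spec : ∀ (cs : List Char) (ind : Int),
    vowelPos cs ind = vowelPos (innerA cs ind).1 (innerA cs ind).2 ∧
    (innerA cs ind).2 + ((innerA cs ind).1.length : Int) = ind + (cs.length : Int) ∧
    ind ≤ (innerA cs ind).2 ∧
    (∀ c t, (innerA cs ind).1 = c :: t → is_consonant c = false) := by
  intro cs
  induction cs with
  | nil => intro ind; simp [innerA, vowelPos]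
  | cons c rest ih =>
    intro ind
    by_cases h : is_consonant c = true
    · have hv : VOWELS.contains c = false := by
        simpa [is_consonant] using h
      simp only [innerA, h, if_pos]
      obtain ⟨h1, h2, h3, h4⟩ := ih (ind + 1)
      refine ⟨?_, ?_, ?_, h4⟩
      · simp only [vowelPos, hv, Bool.false_eq_true, if_false]; exact h1
      · push_cast [List.length_cons] at h2 ⊢; omega
      · omega
    · have h' : is_consonant c = false := by simpa using h
      simp only [innerA, h', Bool.false_eq_true, if_false]
      refine ⟨by trivial, by push_cast [List.length_cons], le_refl _, ?_⟩
      intro c' t' ht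
      cases ht; exact h'

theorem pyRange_one_nil (a b : Int) (h : b ≤ a) : PySem.List.pyRange a b 1 = [] := by
  rw [PySem.List.pyRange_one]
  have : (b - a).toNat = 0 := by omega
  simp [this]

theorem loopA_eq_gwin (rml : Int) : ∀ (n : Nat) (cs : List Char) (ind : Int), cs.length ≤ n →
    loopA rml cs ind = gwin rml ((ind - 1) :: (vowelPos cs ind ++ [ind + (cs.length : Int)])) := by
  intro n
  induction n with
  | zero =>
    intro cs ind h
    have : cs = [] := List.eq_nil_of_length_eq_zero (Nat.le_zero.mp h)
    subst this
    simp [loopA, vowelPos, gwin, win]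
  | succ n ih =>
    intro cs ind h
    cases cs with
    | nil => simp [loopA, vowelPos, gwin, win]
    | cons c rest =>
      by_cases hc : is_consonant c = true
      · -- consonant: A scans the run with innerA, B sees the gap up to the next boundary
        have hv : VOWELS.contains c = false := by simpa [is_consonant] using hc
        rw [loopA]
        simp only [hc, if_pos]
        obtain ⟨h1, h2, h3, h4⟩ := innerA_spec rest (ind + 1)
        set p := innerA rest (ind + 1) with hp
        have hvb : vowelPos (c :: rest) ind = vowelPos p.1 p.2 := by
          simp only [vowelPos, hv, Bool.false_eq_true, if_false]; exact h1
        have hlen : ind + ((c :: rest).length : Int) = p.2 + (p.1.length : Int) := by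
          push_cast [List.length_cons] at h2 ⊢; omega
        -- the emitted windows equal win rml (ind - 1, p.2)
        have hwin : (if p.2 - ind ≥ rml then
              (PySem.List.pyRange ind (p.2 - rml + 1) 1).map (fun i => (i, i + rml - 1)) else [])
            = win rml (ind - 1, p.2) := by
          unfold win
          have hgt : p.2 - (ind - 1) > 1 := by omega
          rw [if_pos hgt]
          by_cases hge : p.2 - ind ≥ rml
          · rw [if_pos hge]
            have : ind - 1 + 1 = ind := by omega
            rw [this]
          · rw [if_neg hge]
            rw [pyRange_one_nil _ _ (by omega)]
            simp
        cases hrest : p.1 with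
        | nil =>
          have : p.2 = ind + ((c :: rest).length : Int) := by
            rw [hlen, hrest]; simp
          rw [hvb, hrest, loopA]
          simp only [vowelPos, List.nil_append, gwin, win, List.append_nil, ← this]
          rw [hwin]; rfl
        | cons c' t =>
          have hc' : is_consonant c' = false := h4 c' t hrest
          have hv' : VOWELS.contains c' = true := by
            simpa [is_consonant] using hc'
          have htlen : ind + ((c :: rest).length : Int) = (p.2 + 1) + (t.length : Int) := by
            rw [hlen, hrest]; push_cast [List.length_cons]; omega
          have hstep : loopA rml (c' :: t) p.2 = loopA rml t (p.2 + 1) := by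
            rw [loopA]
            simp [hc']
          have htn : t.length ≤ n := by
            have := innerA_length_le rest (ind + 1)
            rw [← hp, hrest] at this
            simp only [List.length_cons] at this h
            omega
          rw [hvb, hrest, htlen]
          simp only [vowelPos, hv', if_pos]
          rw [hstep, ih t (p.2 + 1) htn]
          show _ = gwin rml ((ind - 1) :: p.2 :: (vowelPos t (p.2 + 1) ++ [p.2 + 1 + (t.length : Int)]))
          rw [gwin, hwin]
          congr 1
          have : (p.2 + 1) - 1 = p.2 := by omega
          rw [this]
      · -- vowel at ind: a degenerate gap (ind-1, ind), then recurse
        have hv : VOWELS.contains c = true := by simpa [is_consonant] using hc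
        rw [loopA]
        simp only [hc, Bool.false_eq_true, if_false]
        rw [ih rest (ind + 1) (by simpa using Nat.le_of_succ_le_succ (by simpa using h))]
        simp only [vowelPos, hv, if_pos, List.cons_append]
        show _ = gwin rml ((ind - 1) :: ind :: (vowelPos rest (ind + 1) ++ [ind + ((c :: rest).length : Int)]))
        rw [gwin]
        have hwin0 : win rml (ind - 1, ind) = [] := by
          unfold win
          rw [if_neg (by omega)]
        rw [hwin0, List.nil_append]
        have e1 : ind + 1 - 1 = ind := by omega
        have e2 : ind + ((c :: rest).length : Int) = ind + 1 + (rest.length : Int) := by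
          push_cast [List.length_cons]; omega
        rw [e1, e2]

-- ===== VERDICT =====
theorem find_cons_ranges_spec : Claim_equal_find_cons_ranges := by
  intro string rml _
  unfold Spec_find_cons_ranges find_cons_ranges find_cons_ranges_alt
  rw [loopA_eq_gwin rml string.toList.length string.toList 0 (le_refl _)]
  show _ = (_root_.List.flatMap _ _)
  rw [show (fun p : Int × Int => if p.2 - p.1 > 1 then
        (PySem.List.pyRange (p.1 + 1) (p.2 - rml + 1) 1).map (fun i => (i, i + rml - 1))
      else []) = win rml from rfl]
  rw [zip_tail_flatMap]
  norm_num
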